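-- pv_equiv track=rewrite | github.com/TomKaltofen/cedh-mulligan-simulator | cedh_mulligan_simulator/mana.py | _find_exile_card
-- ===== SOURCE A (Python) =====
-- from typing import Callable, List, Optional, Set, Tuple
--
-- def _find_exile_card(hand: List[str], played: Set[str], land_played: Optional[str]) -> Optional[str]:
--     """Find a card to exile for Gemstone Caverns. Returns the card name or None."""
--     # Prefer filler cards first
--     for card_name in hand:
--         if card_name not in played and card_name != land_played and card_name == "filler":
--             return card_name
--     # Then find any card that isn't the land we're playing
--     for card_name in hand:
--         if card_name not in played and card_name != land_played:
--             return card_name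
--     return None
-- ===== SOURCE B (Python) =====
-- from typing import List, Optional, Set
--
-- def _find_exile_card(hand: List[str], played: Set[str], land_played: Optional[str]) -> Optional[str]:
--     """Single pass: return the first eligible 'filler' immediately; otherwise
--     remember the first eligible card as a fallback and return it at the end."""
--     fallback = None
--     for card in hand:
--         if card in played or card == land_played:
--             continue
--         if card == "filler":
--             return card
--         if fallback is None:
--             fallback = card
--     return fallback
-- ===== Notes on version B (the rewrite author's own statement) =====
-- stated objective: simpler
-- what changed: Replaced A's two sequential scans of hand (filler-first, then any eligible) by one pass that returns immediately on an eligible 'filler' and keeps the first eligible card in a fallback variable.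
import Mathlib
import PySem

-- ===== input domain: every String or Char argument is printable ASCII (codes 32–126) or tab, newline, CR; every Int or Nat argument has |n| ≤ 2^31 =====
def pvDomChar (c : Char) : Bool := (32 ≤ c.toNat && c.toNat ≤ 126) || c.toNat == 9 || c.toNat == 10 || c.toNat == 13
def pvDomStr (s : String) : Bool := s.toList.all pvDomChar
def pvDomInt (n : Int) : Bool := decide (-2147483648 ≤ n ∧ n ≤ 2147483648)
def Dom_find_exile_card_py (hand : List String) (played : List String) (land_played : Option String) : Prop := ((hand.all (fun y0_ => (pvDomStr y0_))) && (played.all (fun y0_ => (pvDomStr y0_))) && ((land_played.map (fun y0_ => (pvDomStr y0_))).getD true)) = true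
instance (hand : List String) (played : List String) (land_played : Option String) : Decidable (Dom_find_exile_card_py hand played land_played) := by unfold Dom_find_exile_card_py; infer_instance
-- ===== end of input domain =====

-- B replaces A's two sequential scans by one pass with a fallback variable (objective: simpler).
-- ===== PORT A =====
-- first loop of A: first card not in played, ≠ land_played and equal to "filler"
def pvA_fillerLoop (hand : List String) (played : List String) (land_played : Option String) : Option String :=
  match hand with
  | [] => none
  | c :: t =>
    if c ∉ played ∧ some c ≠ land_played ∧ c = "filler" then some c
    else pvA_fillerLoop t played land_played

-- second loop of A: first card not in played and ≠ land_played
def pvA_anyLoop (hand : List String) (played : List String) (land_played : Option String) : Option String :=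
  match hand with
  | [] => none
  | c :: t =>
    if c ∉ played ∧ some c ≠ land_played then some c
    else pvA_anyLoop t played land_played

def find_exile_card_py (hand : List String) (played : List String) (land_played : Option String) : Option String :=
  match pvA_fillerLoop hand played land_played with
  | some c => some c
  | none => pvA_anyLoop hand played land_played

-- ===== PORT B =====
-- single pass of B, carrying the fallback variable
def pvB_go (hand : List String) (played : List String) (land_played : Option String) (fallback : Option String) : Option String :=
  match hand with
  | [] => fallback
  | c :: t =>
    if c ∈ played ∨ some c = land_played then pvB_go t played land_played fallback
    else if c = "filler" then some c
    else if fallback = none then pvB_go t played land_played (some c)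
    else pvB_go t played land_played fallback

def find_exile_card_py_alt (hand : List String) (played : List String) (land_played : Option String) : Option String :=
  pvB_go hand played land_played none

-- ===== PRECONDITION & SPEC =====
def Spec_find_exile_card_py (hand : List String) (played : List String) (land_played : Option String) (out : Option String) : Prop := out = find_exile_card_py_alt hand played land_played
instance (hand : List String) (played : List String) (land_played : Option String) (out : Option String) : Decidable (Spec_find_exile_card_py hand played land_played out) := by unfold Spec_find_exile_card_py; infer_instance

-- ===== CLAIM (what is proved, stated in full; the proofs are below) =====
def Claim_equal_find_exile_card_py : Prop := ∀ (hand : List String) (played : List String) (land_played : Option String), Dom_find_exile_card_py hand played land_played → Spec_find_exile_card_py hand played land_played (find_exile_card_py hand played land_played)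

-- ===== LEMMAS AND PROOFS =====

-- ===== VERDICT (by name: the statement is the Claim_ definition above) =====
-- pvB_go equals: A's filler loop, else the fallback, else A's any loop
theorem pvB_go_eq (played : List String) (land_played : Option String) :
    ∀ (hand : List String) (fb : Option String),
      pvB_go hand played land_played fb =
        match pvA_fillerLoop hand played land_played with
        | some c => some c
        | none => match fb with
          | some x => some x
          | none => pvA_anyLoop hand played land_played := by
  intro hand
  induction hand with
  | nil => intro fb; cases fb <;> simp [pvB_go, pvA_fillerLoop, pvA_anyLoop]
  | cons c t ih =>
    intro fb
    by_cases hin : c ∈ played ∨ some c = land_played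
    · have hne : ¬ (c ∉ played ∧ some c ≠ land_played) := by tauto
      have hne3 : ¬ (c ∉ played ∧ some c ≠ land_played ∧ c = "filler") := by tauto
      simp only [pvB_go, pvA_fillerLoop, pvA_anyLoop, if_pos hin, if_neg hne, if_neg hne3]
      exact ih fb
    · have hel : c ∉ played ∧ some c ≠ land_played := by tauto
      by_cases hf : c = "filler"
      · have h3 : c ∉ played ∧ some c ≠ land_played ∧ c = "filler" := ⟨hel.1, hel.2, hf⟩
        simp [pvB_go, pvA_fillerLoop, if_neg hin, if_pos hf, if_pos h3]
      · have h3 : ¬ (c ∉ played ∧ some c ≠ land_played ∧ c = "filler") := by tauto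
        simp only [pvB_go, pvA_fillerLoop, pvA_anyLoop, if_neg hin, if_neg hf, if_pos hel,
          if_neg h3]
        cases fb with
        | some x => simp [ih (some x)]
        | none => simp [ih (some c)]

theorem find_exile_card_py_spec : Claim_equal_find_exile_card_py := by
  intro hand played land_played _
  unfold Spec_find_exile_card_py find_exile_card_py find_exile_card_py_alt
  rw [pvB_go_eq]
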